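-- pv_equiv track=rewrite | github.com/daniel-reich/ubiquitous-fiesta | wqBnr3CDYByA5GLxo_10.py | unravel
-- ===== SOURCE A (Python) =====
-- def unravel(txt,result=['']):
--     if txt == '':
--         return sorted(result)
--     if txt[0] != '[':
--         result = [i+txt[0] for i in result]
--         return unravel(txt[1:],result)
--     else:
--         end = txt.index(']')
--         lst = txt[1:end].split('|')
--         result = [i+j for i in result for j in lst]
--         return unravel(txt[end+1:],result)
-- ===== SOURCE B (Python) =====
-- def unravel(txt, result=['']):
--     # Tokenize txt once into choice-groups, then cross the seed `result`
--     # with every group, and sort at the end.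
--     groups = []
--     i = 0
--     while i < len(txt):
--         c = txt[i]
--         if c != '[':
--             groups.append([c])
--             i += 1
--         else:
--             end = txt.index(']', i)
--             groups.append(txt[i + 1:end].split('|'))
--             i = end + 1
--     out = list(result)
--     for g in groups:
--         out = [p + s for p in out for s in g]
--     return sorted(out)
-- ===== Notes on version B (the rewrite author's own statement) =====
-- stated objective: faster
-- what changed: Replaces A's recursive char-by-char accumulation (which copies the remaining string with txt[1:] at every step) by a two-phase decomposition: one iterative index-based pass tokenizes txt into choice-groups, then a single fold crosses the seed result with each group before the final sort.
import Mathlib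
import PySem

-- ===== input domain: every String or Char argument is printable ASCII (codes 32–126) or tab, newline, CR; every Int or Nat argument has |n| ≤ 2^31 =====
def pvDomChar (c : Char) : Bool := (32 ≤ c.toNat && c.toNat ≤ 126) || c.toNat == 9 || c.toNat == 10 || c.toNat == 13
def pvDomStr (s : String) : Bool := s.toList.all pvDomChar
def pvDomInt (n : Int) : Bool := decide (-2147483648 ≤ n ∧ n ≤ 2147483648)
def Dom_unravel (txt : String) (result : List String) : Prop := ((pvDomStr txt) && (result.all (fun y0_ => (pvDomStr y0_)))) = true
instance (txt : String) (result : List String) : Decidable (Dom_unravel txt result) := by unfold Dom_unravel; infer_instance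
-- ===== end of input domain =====

-- B replaces A's recursive char-by-char accumulation by tokenize-into-groups then one
-- cross-product fold, indexing txt instead of re-slicing it (same return value on Pre_).


-- ===== PORT A =====
-- Literal port of A over txt.toList. txt.index(']') is searched in the suffix 'rest'
-- (the head is '[' ≠ ']', so Python's index over the whole suffix is 1 + this one;
-- txt[1:end] = rest.take e and txt[end+1:] = rest.drop (e+1) under that re-indexing).
-- When ']' is absent Python raises ValueError; that input is excluded by Pre_ and the
-- port returns [] there.
def unravelA (l : List Char) (result : List String) : List String :=
  match l with
  | [] => PySem.List.sorted result (fun s => s) false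
  | c :: rest =>
    if c ≠ '[' then
      unravelA rest (result.map (fun i => i ++ String.ofList [c]))
    else
      match PySem.List.index? rest ']' with
      | none => []  -- Python: ValueError (excluded by Pre_unravel)
      | some e =>
        unravelA (rest.drop (e + 1))
          (result.flatMap (fun i =>
            ((PySem.Chars.splitOn (rest.take e) ['|']).map String.ofList).map (fun j => i ++ j)))
termination_by l.length
decreasing_by
  all_goals (simp [List.length_drop]; try omega)

def unravel (txt : String) (result : List String) : List String :=
  unravelA txt.toList result

-- ===== PORT B =====
-- Port of Source B: the while-loop tokenizer (index i over txt) becomes structural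
-- recursion over the suffix txt.toList.drop i; txt.index(']', i) raising ValueError
-- becomes the none case.
def pvTokenize (l : List Char) : Option (List (List String)) :=
  match l with
  | [] => some []
  | c :: rest =>
    if c ≠ '[' then
      (pvTokenize rest).map (fun gs => [String.ofList [c]] :: gs)
    else
      match PySem.List.index? rest ']' with
      | none => none  -- Python: ValueError from txt.index
      | some e =>
        (pvTokenize (rest.drop (e + 1))).map
          (fun gs => (PySem.Chars.splitOn (rest.take e) ['|']).map String.ofList :: gs)
termination_by l.length
decreasing_by
  all_goals (simp [List.length_drop]; try omega)

-- out = [p + s for p in out for s in g]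
def pvStep (out : List String) (g : List String) : List String :=
  out.flatMap (fun p => g.map (fun s => p ++ s))

def unravel_alt (txt : String) (result : List String) : List String :=
  match pvTokenize txt.toList with
  | none => []  -- Python B raises ValueError here (excluded by Pre_unravel)
  | some gs => PySem.List.sorted (gs.foldl pvStep result) (fun s => s) false

-- ===== PRECONDITION & SPEC =====
-- Pre_ excludes exactly the inputs where A raises ValueError: a '[' with no ']' at a
-- later position of txt (both programs raise there).
def Pre_unravel (txt : String) (result : List String) : Prop :=
  ∀ i, i < txt.toList.length → txt.toList[i]! = '[' →
    ∃ j, j < txt.toList.length ∧ i < j ∧ txt.toList[j]! = ']'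
instance (txt : String) (result : List String) : Decidable (Pre_unravel txt result) := by
  unfold Pre_unravel; infer_instance

def pvWitness_unravel : String × List String := ("a[b|c]d", [""])

def Spec_unravel (txt : String) (result : List String) (out : List String) : Prop := out = unravel_alt txt result
instance (txt : String) (result : List String) (out : List String) : Decidable (Spec_unravel txt result out) := by unfold Spec_unravel; infer_instance

-- ===== CLAIM (what is proved, stated in full; the proofs are below) =====
def Claim_equal_unravel : Prop := ∀ (txt : String) (result : List String), Dom_unravel txt result → Pre_unravel txt result → Spec_unravel txt result (unravel txt result)

-- ===== LEMMAS AND PROOFS =====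

-- the bracketed-char condition on plain char lists (Pre_unravel txt _ = pvPreL txt.toList)
def pvPreL (l : List Char) : Prop :=
  ∀ i, i < l.length → l[i]! = '[' → ∃ j, j < l.length ∧ i < j ∧ l[j]! = ']'

lemma pvPreL_drop {l : List Char} (k : Nat) (h : pvPreL l) : pvPreL (l.drop k) := by
  intro i hi hc
  have hlen : (l.drop k).length = l.length - k := List.length_drop ..
  have hik : k + i < l.length := by omega
  have hget : (l.drop k)[i]! = l[k + i]! := by
    rw [List.getElem!_eq_getElem?_getD, List.getElem!_eq_getElem?_getD,
        List.getElem?_drop]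
  obtain ⟨j, hj, hij, hcj⟩ := h (k + i) hik (by rw [← hget]; exact hc)
  refine ⟨j - k, by omega, by omega, ?_⟩
  have : (l.drop k)[j - k]! = l[k + (j - k)]! := by
    rw [List.getElem!_eq_getElem?_getD, List.getElem!_eq_getElem?_getD,
        List.getElem?_drop]
  rw [this, show k + (j - k) = j by omega]; exact hcj

lemma pvPreL_head_bracket {rest : List Char} (h : pvPreL ('[' :: rest)) :
    ∃ e, PySem.List.index? rest ']' = some e := by
  obtain ⟨j, hj, hij, hcj⟩ := h 0 (by simp) (by simp)
  have hj' : j - 1 < rest.length := by simp at hj; omega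
  have : rest[j - 1]! = ']' := by
    have : ('[' :: rest)[j]! = rest[j - 1]! := by
      rw [List.getElem!_eq_getElem?_getD, List.getElem!_eq_getElem?_getD]
      cases j with
      | zero => omega
      | succ k => simp
    rw [← this]; exact hcj
  have hmem : ']' ∈ rest := by
    rw [← this, getElem!_pos rest (j - 1) hj']
    exact List.getElem_mem hj'
  rcases Option.isSome_iff_exists.mp ((PySem.List.index?_isSome_iff rest ']').mpr hmem) with ⟨e, he⟩
  exact ⟨e, he⟩

lemma pvStep_singleton (out : List String) (s : String) :
    pvStep out [s] = out.map (fun p => p ++ s) := by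
  simp only [pvStep, List.map_singleton]
  exact Eq.symm List.map_eq_flatMap

-- main invariant: on pvPreL inputs the tokenizer succeeds and A's recursion equals
-- sorting the fold of pvStep over the groups.
lemma pv_main : ∀ (n : Nat) (l : List Char), l.length ≤ n → pvPreL l →
    ∃ gs, pvTokenize l = some gs ∧
      ∀ result, unravelA l result =
        PySem.List.sorted (gs.foldl pvStep result) (fun s => s) false := by
  intro n
  induction n with
  | zero =>
    intro l hl _
    have : l = [] := List.eq_nil_of_length_eq_zero (by omega)
    subst this
    exact ⟨[], by simp [pvTokenize], fun result => by simp [unravelA]⟩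
  | succ n ih =>
    intro l hl hpre
    match l with
    | [] =>
      exact ⟨[], by simp [pvTokenize], fun result => by simp [unravelA]⟩
    | c :: rest =>
      by_cases hc : c = '['
      · subst hc
        obtain ⟨e, he⟩ := pvPreL_head_bracket hpre
        have hrec : pvPreL (rest.drop (e + 1)) := by
          have : pvPreL rest := by
            have := pvPreL_drop 1 hpre; simpa using this
          simpa using pvPreL_drop (e + 1) this
        have hlen : (rest.drop (e + 1)).length ≤ n := by
          simp [List.length_drop]; simp at hl; omega
        obtain ⟨gs, hgs, heq⟩ := ih (rest.drop (e + 1)) hlen hrec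
        have he' : List.idxOf? ']' rest = some e := by
          rw [← PySem.List.index?_eq_idxOf?]; exact he
        refine ⟨(PySem.Chars.splitOn (rest.take e) ['|']).map String.ofList :: gs, ?_, ?_⟩
        · simp [pvTokenize, he', hgs]
        · intro result
          rw [unravelA]
          simp only [he', PySem.List.index?_eq_idxOf?, ne_eq, not_true_eq_false, if_false,
            List.foldl_cons]
          rw [heq]
          rfl
      · have hrest : pvPreL rest := by
          have := pvPreL_drop 1 hpre; simpa using this
        obtain ⟨gs, hgs, heq⟩ := ih rest (by simp at hl; omega) hrest
        refine ⟨[String.ofList [c]] :: gs, ?_, ?_⟩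
        · simp [pvTokenize, hc, hgs]
        · intro result
          rw [unravelA]
          rw [if_pos hc]
          simp only [List.foldl_cons, pvStep_singleton]
          exact heq _

-- ===== VERDICT (by name: the statement is the Claim_ definition above) =====
theorem unravel_spec : Claim_equal_unravel := by
  intro txt result _ hpre
  unfold Spec_unravel unravel unravel_alt
  obtain ⟨gs, hgs, heq⟩ := pv_main txt.toList.length txt.toList le_rfl hpre
  rw [hgs]
  exact heq result
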